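-- pv_equiv track=rewrite | github.com/Deepak-Urs/github-main | Python/dsaOne/problem-solving/step-7: Recursion/Medium problems/subsetsUnique.py | subsetsUnique
-- ===== SOURCE A (Python) =====
-- def subsetsUnique(ip, op, s):
--     if len(ip) == 0:
--         op = ""
--         return
--
--     op1 = op
--     op2 = op + ip[0]
--
--     if op1 not in s:
--         s.append(op1)
--
--     if op2 not in s:
--         s.append(op2)
--
--     ip = ip[1:]
--
--     subsetsUnique(ip, op1, s)
--     subsetsUnique(ip, op2, s)
--
--     return s
-- ===== SOURCE B (Python) =====
-- def subsetsUnique(ip, op, s):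
--     if len(ip) == 0:
--         return
--     stack = [(ip, op)]
--     while stack:
--         cur_ip, cur_op = stack.pop()
--         if not cur_ip:
--             continue
--         op1 = cur_op
--         op2 = cur_op + cur_ip[0]
--         if op1 not in s:
--             s.append(op1)
--         if op2 not in s:
--             s.append(op2)
--         stack.append((cur_ip[1:], op2))
--         stack.append((cur_ip[1:], op1))
--     return s
-- ===== Notes on version B (the rewrite author's own statement) =====
-- stated objective: alternative
-- what changed: Replaces A's double self-recursion with an iterative DFS over an explicit stack (pushing the op2 branch first so popping keeps A's preorder), mutating the same passed-in list.
import Mathlib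
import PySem

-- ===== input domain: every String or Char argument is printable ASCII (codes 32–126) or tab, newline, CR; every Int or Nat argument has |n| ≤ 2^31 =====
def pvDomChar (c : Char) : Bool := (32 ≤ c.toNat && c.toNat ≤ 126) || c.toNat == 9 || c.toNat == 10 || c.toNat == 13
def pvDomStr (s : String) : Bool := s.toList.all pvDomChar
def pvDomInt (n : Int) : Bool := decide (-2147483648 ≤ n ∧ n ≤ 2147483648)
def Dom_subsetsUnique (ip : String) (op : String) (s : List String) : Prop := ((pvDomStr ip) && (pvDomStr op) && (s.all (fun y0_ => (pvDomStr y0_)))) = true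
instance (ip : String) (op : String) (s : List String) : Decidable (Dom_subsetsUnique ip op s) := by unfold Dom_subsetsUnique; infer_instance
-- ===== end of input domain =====

-- ===== PORT A =====
-- B replaces A's double self-recursion with an explicit-stack iterative DFS (alternative decomposition, same cost);
-- Python A/B mutate the argument list s in place; the equivalence proved here is about the RETURN value only.
-- recursive helper of A: returns the (mutated) accumulator list
def subAux : List Char → String → List String → List String
  | [], _, s => s
  | c :: rest, op, s =>
    let op1 := op
    let op2 := op.push c
    let s1 := if s.contains op1 then s else s ++ [op1]
    let s2 := if s1.contains op2 then s1 else s1 ++ [op2]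
    subAux rest op2 (subAux rest op1 s2)

def subsetsUnique (ip : String) (op : String) (s : List String) : Option (List String) :=
  if ip.toList = [] then none
  else some (subAux ip.toList op s)

-- ===== PORT B =====
-- explicit-stack DFS loop; head of the list is the top of the stack
def subAltLoop : List (List Char × String) → List String → List String
  | [], s => s
  | ([], _) :: rest, s => subAltLoop rest s
  | (c :: tl, op) :: rest, s =>
    let op1 := op
    let op2 := op.push c
    let s1 := if s.contains op1 then s else s ++ [op1]
    let s2 := if s1.contains op2 then s1 else s1 ++ [op2]
    subAltLoop ((tl, op1) :: (tl, op2) :: rest) s2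
termination_by st _ => (st.map (fun p => 3 ^ p.1.length)).sum
decreasing_by
  · simp
  · simp [pow_succ]
    have h : 0 < (3:ℕ) ^ tl.length := Nat.pow_pos (by norm_num)
    omega

def subsetsUnique_alt (ip : String) (op : String) (s : List String) : Option (List String) :=
  if ip.toList = [] then none
  else some (subAltLoop [(ip.toList, op)] s)

-- ===== PRECONDITION & SPEC =====
def Spec_subsetsUnique (ip : String) (op : String) (s : List String) (out : Option (List String)) : Prop := out = subsetsUnique_alt ip op s
instance (ip : String) (op : String) (s : List String) (out : Option (List String)) : Decidable (Spec_subsetsUnique ip op s out) := by unfold Spec_subsetsUnique; infer_instance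

-- ===== CLAIM (what is proved, stated in full; the proofs are below) =====
def Claim_equal_subsetsUnique : Prop := ∀ (ip : String) (op : String) (s : List String), Dom_subsetsUnique ip op s → Spec_subsetsUnique ip op s (subsetsUnique ip op s)

-- ===== LEMMAS AND PROOFS =====
-- invariant of the stack loop: processing the top frame equals running A's recursion on it
lemma subAltLoop_frame (ip : List Char) : ∀ (op : String) (rest : List (List Char × String)) (s : List String),
    subAltLoop ((ip, op) :: rest) s = subAltLoop rest (subAux ip op s) := by
  induction ip with
  | nil => intro op rest s; simp [subAltLoop, subAux]
  | cons c tl ih =>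
    intro op rest s
    rw [subAltLoop, subAux]
    simp only [ih]



-- ===== VERDICT (by name: the statement is the Claim_ definition above) =====
theorem subsetsUnique_spec : Claim_equal_subsetsUnique := by
  intro ip op s _
  unfold Spec_subsetsUnique subsetsUnique subsetsUnique_alt
  by_cases h : ip.toList = []
  · simp [h]
  · simp [h, subAltLoop_frame, subAltLoop]
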